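-- pv_equiv track=rewrite | github.com/Phucptit2003/Python-PTIT | DoThiHinhSao.py | is_star_graph
-- ===== SOURCE A (Python) =====
-- def is_star_graph(n, edges):
--     # Tạo một danh sách kề để lưu các đỉnh kề với mỗi đỉnh
--     adjacency_list = [[] for _ in range(n)]
--
--     # Tính bậc của từng đỉnh
--     degrees = [0] * n
--
--     for u, v in edges:
--         adjacency_list[u - 1].append(v - 1)
--         adjacency_list[v - 1].append(u - 1)
--         degrees[u - 1] += 1
--         degrees[v - 1] += 1
--
--     # Tìm đỉnh có bậc lớn nhất
--     max_degree_vertex = max(range(n), key=lambda x: degrees[x])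
--
--     # Kiểm tra xem đỉnh có bậc lớn nhất có bậc bằng N - 1 và tất cả các đỉnh khác có bậc bằng 1 không
--     if degrees[max_degree_vertex] == n - 1 and all(degrees[i] == 1 for i in range(n) if i != max_degree_vertex):
--         return "Yes"
--     else:
--         return "No"
-- ===== SOURCE B (Python) =====
-- def is_star_graph(n, edges):
--     degrees = [0] * n
--     for u, v in edges:
--         degrees[u - 1] += 1
--         degrees[v - 1] += 1
--     if sorted(degrees) == [1] * (n - 1) + [n - 1]:
--         return "Yes"
--     return "No"
-- ===== Notes on version B (the rewrite author's own statement) =====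
-- stated objective: simpler
-- what changed: B drops the unused adjacency-list construction and replaces A's argmax-center location plus all()-predicate check by comparing the sorted degree sequence with the canonical star sequence [1]*(n-1)+[n-1].
import Mathlib
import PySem

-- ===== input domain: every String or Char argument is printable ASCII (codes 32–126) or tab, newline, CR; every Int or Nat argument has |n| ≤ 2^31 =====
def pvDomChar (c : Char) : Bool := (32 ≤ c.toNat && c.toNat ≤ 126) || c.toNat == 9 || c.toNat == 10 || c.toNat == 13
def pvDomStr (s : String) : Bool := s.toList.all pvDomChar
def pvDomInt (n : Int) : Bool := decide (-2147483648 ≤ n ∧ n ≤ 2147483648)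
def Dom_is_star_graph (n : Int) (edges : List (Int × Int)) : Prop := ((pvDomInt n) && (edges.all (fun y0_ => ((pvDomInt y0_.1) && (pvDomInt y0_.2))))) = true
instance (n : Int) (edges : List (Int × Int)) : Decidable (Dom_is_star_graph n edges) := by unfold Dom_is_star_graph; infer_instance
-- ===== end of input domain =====

-- B replaces A's argmax-center-plus-predicate check by comparing the sorted degree
-- sequence to the canonical star sequence; objective: simpler (B also drops A's unused
-- adjacency list).

-- Python lists are arrays (O(1) indexing), so both ports carry their list state as
-- `Array`. pyGetA/pySetA hand-port Python's a[i] read/write exactly on -len(a) ≤ i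
-- < len(a) (negative i counts from the end); outside that range Python raises
-- IndexError (excluded by Pre_) and these return the default / leave the array as is.
def pyGetA {α : Type} (a : Array α) (i : Int) (d : α) : α :=
  if 0 ≤ i ∧ i < (a.size : Int) then a.getD i.toNat d
  else if -(a.size : Int) ≤ i ∧ i < 0 then a.getD (i + a.size).toNat d
  else d

def pySetA {α : Type} (a : Array α) (i : Int) (v : α) : Array α :=
  if 0 ≤ i ∧ i < (a.size : Int) then a.setIfInBounds i.toNat v
  else if -(a.size : Int) ≤ i ∧ i < 0 then a.setIfInBounds (i + a.size).toNat v
  else a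

-- ===== PORT A =====
-- one iteration of A's edge loop, carrying (adjacency_list, degrees);
-- list.append is Array.push
def pvStepA (st : Array (Array Int) × Array Int) (e : Int × Int) : Array (Array Int) × Array Int :=
  let adj1 := pySetA st.1 (e.1 - 1) ((pyGetA st.1 (e.1 - 1) #[]).push (e.2 - 1))
  let adj2 := pySetA adj1 (e.2 - 1) ((pyGetA adj1 (e.2 - 1) #[]).push (e.1 - 1))
  let deg1 := pySetA st.2 (e.1 - 1) (pyGetA st.2 (e.1 - 1) 0 + 1)
  let deg2 := pySetA deg1 (e.2 - 1) (pyGetA deg1 (e.2 - 1) 0 + 1)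
  (adj2, deg2)

def is_star_graph (n : Int) (edges : List (Int × Int)) : String :=
  let st := edges.foldl pvStepA
    (((PySem.List.pyRange 0 n 1).map (fun _ => (#[] : Array Int))).toArray,
     Array.replicate n.toNat (0 : Int))
  let degrees := st.2
  -- max(range(n), key=…): none = ValueError on n ≤ 0, excluded by Pre_
  match PySem.List.max? (PySem.List.pyRange 0 n 1) (fun x => pyGetA degrees x 0) with
  | none => ""
  | some m =>
    if pyGetA degrees m 0 == n - 1 &&
       ((PySem.List.pyRange 0 n 1).filter (fun i => !(i == m))).all
         (fun i => pyGetA degrees i 0 == 1)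
    then "Yes" else "No"

-- ===== PORT B =====
-- one iteration of B's degree-counting loop
def pvStepB (deg : Array Int) (e : Int × Int) : Array Int :=
  let d1 := pySetA deg (e.1 - 1) (pyGetA deg (e.1 - 1) 0 + 1)
  pySetA d1 (e.2 - 1) (pyGetA d1 (e.2 - 1) 0 + 1)

def is_star_graph_alt (n : Int) (edges : List (Int × Int)) : String :=
  let degrees := edges.foldl pvStepB (Array.replicate n.toNat (0 : Int))
  if List.mergeSort degrees.toList (fun a b => a ≤ b)
       == List.replicate (n - 1).toNat (1 : Int) ++ [n - 1]
  then "Yes" else "No"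

-- ===== PRECONDITION & SPEC =====
-- Pre_ excludes exactly the inputs where A raises: n ≤ 0 (max() over an empty range,
-- ValueError) and edges whose endpoints index outside the lists (IndexError);
-- Python's negative-index wraparound inputs (e.g. u = 0) stay INSIDE Pre_.
def Pre_is_star_graph (n : Int) (edges : List (Int × Int)) : Prop :=
  1 ≤ n ∧ ∀ e ∈ edges, (1 - n ≤ e.1 ∧ e.1 ≤ n) ∧ (1 - n ≤ e.2 ∧ e.2 ≤ n)
instance (n : Int) (edges : List (Int × Int)) : Decidable (Pre_is_star_graph n edges) := by
  unfold Pre_is_star_graph; infer_instance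
def pvWitness_is_star_graph : Int × (List (Int × Int)) := (3, [(1, 2), (1, 3)])

def Spec_is_star_graph (n : Int) (edges : List (Int × Int)) (out : String) : Prop := out = is_star_graph_alt n edges
instance (n : Int) (edges : List (Int × Int)) (out : String) : Decidable (Spec_is_star_graph n edges out) := by unfold Spec_is_star_graph; infer_instance

-- ===== CLAIM (what is proved, stated in full; the proofs are below) =====
def Claim_equal_is_star_graph : Prop := ∀ (n : Int) (edges : List (Int × Int)), Dom_is_star_graph n edges → Pre_is_star_graph n edges → Spec_is_star_graph n edges (is_star_graph n edges)

-- ===== LEMMAS AND PROOFS =====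

-- A's degrees component is exactly B's fold (the adjacency list never feeds back into it)
lemma pv_snd_foldl (edges : List (Int × Int)) :
    ∀ a d, (edges.foldl pvStepA (a, d)).2 = edges.foldl pvStepB d := by
  induction edges with
  | nil => intro a d; rfl
  | cons e t ih => intro a d; exact ih _ _

lemma pv_size_pySetA {α : Type} (a : Array α) (i : Int) (v : α) :
    (pySetA a i v).size = a.size := by
  unfold pySetA
  split_ifs <;> simp

lemma pv_size_foldB (edges : List (Int × Int)) :
    ∀ d : Array Int, (edges.foldl pvStepB d).size = d.size := by
  induction edges with
  | nil => intro d; rfl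
  | cons e t ih =>
    intro d
    rw [List.foldl_cons, ih]
    simp [pvStepB, pv_size_pySetA]

-- two distinct positions holding v give count ≥ 2
lemma pv_two_le_count {xs : List Int} {v : Int} {i j : Nat}
    (hi : i < xs.length) (hj : j < xs.length) (hij : i ≠ j)
    (hvi : xs[i] = v) (hvj : xs[j] = v) : 2 ≤ xs.count v := by
  suffices h : ∀ (ys : List Int) (p q : Nat) (hq : q < ys.length) (hpq : p < q), ys[p]'(by omega) = v →
      ys[q] = v → 2 ≤ ys.count v by
    rcases Nat.lt_or_ge i j with hlt | hge
    · exact h xs i j hj hlt hvi hvj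
    · exact h xs j i hi (by omega) hvj hvi
  intro ys p q hq hpq hp hqv
  have hsplit := List.take_append_drop (p + 1) ys
  have h1 : v ∈ ys.take (p + 1) := by
    have hp' : p < (ys.take (p + 1)).length := by simp; omega
    have : (ys.take (p + 1))[p]'hp' = v := by
      rw [List.getElem_take]; exact hp
    exact this ▸ List.getElem_mem hp'
  have h2 : v ∈ ys.drop (p + 1) := by
    have hq' : q - (p + 1) < (ys.drop (p + 1)).length := by simp; omega
    have : (ys.drop (p + 1))[q - (p + 1)]'hq' = v := by
      rw [List.getElem_drop]
      have : p + 1 + (q - (p + 1)) = q := by omega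
      simp_rw [this]; exact hqv
    exact this ▸ List.getElem_mem hq'
  have c1 : 1 ≤ (ys.take (p + 1)).count v := List.count_pos_iff.mpr h1
  have c2 : 1 ≤ (ys.drop (p + 1)).count v := List.count_pos_iff.mpr h2
  calc 2 ≤ (ys.take (p + 1)).count v + (ys.drop (p + 1)).count v := by omega
    _ = ys.count v := by rw [← List.count_append, hsplit]

-- main combinatorial fact: A's condition ↔ the sorted degree sequence is canonical
lemma pv_tail_eq (n : Int) (degA : Array Int) (h1 : 1 ≤ n) (hl : degA.size = n.toNat) :
    (match PySem.List.max? (PySem.List.pyRange 0 n 1) (fun x => pyGetA degA x 0) with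
     | none => ""
     | some m =>
       if pyGetA degA m 0 == n - 1 &&
          ((PySem.List.pyRange 0 n 1).filter (fun i => !(i == m))).all
            (fun i => pyGetA degA i 0 == 1)
       then "Yes" else "No")
    = (if List.mergeSort degA.toList (fun a b => a ≤ b)
          == List.replicate (n - 1).toNat (1 : Int) ++ [n - 1]
       then "Yes" else "No") := by
  set deg := degA.toList with hdeg
  have hlen : deg.length = n.toNat := by rw [hdeg, Array.length_toList, hl]
  have hne : PySem.List.pyRange 0 n 1 ≠ [] := by
    intro h
    have h0 : (0 : Int) ∈ PySem.List.pyRange 0 n 1 :=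
      PySem.List.mem_pyRange_one.mpr ⟨le_refl 0, by omega⟩
    rw [h] at h0
    exact absurd h0 (List.not_mem_nil)
  obtain ⟨m, hm⟩ : ∃ m, PySem.List.max? (PySem.List.pyRange 0 n 1)
      (fun x => pyGetA degA x 0) = some m := by
    cases h : PySem.List.max? (PySem.List.pyRange 0 n 1) (fun x => pyGetA degA x 0) with
    | none => exact absurd ((PySem.List.max?_eq_none_iff _ _).mp h) hne
    | some m => exact ⟨m, rfl⟩
  have hmr := PySem.List.mem_pyRange_one.mp (PySem.List.max?_mem hm)
  have hmax := PySem.List.max?_isMax hm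
  rw [hm]
  dsimp only
  have hget : ∀ (i : Int) (h0 : 0 ≤ i) (hi : i < n),
      pyGetA degA i 0 = deg[i.toNat]'(by omega) := by
    intro i h0 hi
    unfold pyGetA
    rw [if_pos ⟨h0, by omega⟩, Array.getD_eq_getD_getElem?,
        Array.getElem?_eq_getElem (by omega)]
    simp [hdeg, Array.getElem_toList]
  have hMN : m.toNat < deg.length := by
    have := hmr.1; have := hmr.2; omega
  have hmax' : ∀ j : Nat, (hj : j < deg.length) → deg[j]'hj ≤ deg[m.toNat]'hMN := by
    intro j hj
    have h' : pyGetA degA (j : Int) 0 ≤ pyGetA degA m 0 :=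
      hmax _ (PySem.List.mem_pyRange_one.mpr ⟨by omega, by omega⟩)
    rw [hget _ (by omega) (by omega), hget _ hmr.1 hmr.2] at h'
    simpa using h'
  have hcond : (pyGetA degA m 0 == n - 1 &&
       ((PySem.List.pyRange 0 n 1).filter (fun i => !(i == m))).all
         (fun i => pyGetA degA i 0 == 1)) = true
      ↔ (deg[m.toNat]'hMN = n - 1 ∧
         ∀ j : Nat, (hj : j < deg.length) → j ≠ m.toNat → deg[j]'hj = 1) := by
    rw [Bool.and_eq_true, beq_iff_eq, hget m hmr.1 hmr.2, List.all_eq_true]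
    constructor
    · rintro ⟨h1', h2⟩
      refine ⟨h1', ?_⟩
      intro j hj hjm
      have hmem : (j : Int) ∈ (PySem.List.pyRange 0 n 1).filter (fun i => !(i == m)) := by
        rw [List.mem_filter]
        refine ⟨PySem.List.mem_pyRange_one.mpr ⟨by omega, by omega⟩, ?_⟩
        simp only [ne_eq, Bool.not_eq_eq_eq_not, Bool.not_true, beq_eq_false_iff_ne]
        omega
      have h3 := h2 _ hmem
      rw [beq_iff_eq, hget _ (by omega) (by omega)] at h3
      simpa using h3
    · rintro ⟨h1', h2⟩
      refine ⟨h1', ?_⟩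
      intro i hi
      rw [List.mem_filter] at hi
      obtain ⟨hir, him⟩ := hi
      have hir' := PySem.List.mem_pyRange_one.mp hir
      rw [beq_iff_eq, hget i hir'.1 hir'.2]
      have him' : i ≠ m := by simpa using him
      exact h2 i.toNat (by omega) (by omega)
  have hkey : (deg[m.toNat]'hMN = n - 1 ∧
         ∀ j : Nat, (hj : j < deg.length) → j ≠ m.toNat → deg[j]'hj = 1)
      ↔ List.mergeSort deg (fun a b => a ≤ b)
          = List.replicate (n - 1).toNat (1 : Int) ++ [n - 1] := by
    constructor
    · rintro ⟨h1', h2⟩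
      have hrep : (n - 1).toNat = deg.length - 1 := by omega
      have htake : deg.take m.toNat = List.replicate m.toNat (1 : Int) := by
        rw [List.eq_replicate_iff]
        refine ⟨by simp; omega, ?_⟩
        intro b hb
        obtain ⟨j, hj, rfl⟩ := List.mem_iff_getElem.mp hb
        rw [List.getElem_take]
        exact h2 j (by simp at hj; omega) (by simp at hj; omega)
      have hdrop : deg.drop (m.toNat + 1)
          = List.replicate (deg.length - m.toNat - 1) (1 : Int) := by
        rw [List.eq_replicate_iff]
        refine ⟨by simp; omega, ?_⟩
        intro b hb
        obtain ⟨j, hj, rfl⟩ := List.mem_iff_getElem.mp hb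
        rw [List.getElem_drop]
        exact h2 _ (by simp at hj; omega) (by simp at hj; omega)
      have hdecomp : deg = List.replicate m.toNat (1 : Int)
          ++ (n - 1) :: List.replicate (deg.length - m.toNat - 1) (1 : Int) := by
        conv_lhs => rw [← List.take_append_drop m.toNat deg]
        rw [htake]
        congr 1
        rw [← List.getElem_cons_drop hMN, h1', hdrop]
      have hL : deg.length - 1 = m.toNat + (deg.length - m.toNat - 1) := by omega
      have hperm : (List.replicate (deg.length - 1) (1 : Int) ++ [n - 1]).Perm deg := by
        conv_rhs => rw [hdecomp]
        rw [hL, List.replicate_add, List.append_assoc]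
        exact List.Perm.append_left _ (List.perm_append_singleton _ _)
      have hpair : (List.replicate (deg.length - 1) (1 : Int) ++ [n - 1]).Pairwise (· ≤ ·) := by
        rw [List.pairwise_append]
        refine ⟨?_, List.pairwise_singleton _ _, ?_⟩
        · exact List.pairwise_replicate.mpr (Or.inr (le_refl 1))
        · intro x hx y hy
          rw [List.eq_of_mem_replicate hx]
          simp only [List.mem_singleton] at hy
          subst hy
          have : deg.length - 1 ≠ 0 := by
            intro h0
            rw [h0] at hx
            exact absurd hx (by simp)
          omega
      have hsorted : (List.mergeSort deg (fun a b => a ≤ b)).Pairwise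
          (fun a b : Int => (a ≤ b : Bool) = true) :=
        List.pairwise_mergeSort (by intro a b c hab hbc; simp at hab hbc ⊢; omega)
          (by intro a b; simp; omega) deg
      have heq : List.mergeSort deg (fun a b => a ≤ b)
          = List.replicate (deg.length - 1) (1 : Int) ++ [n - 1] := by
        refine List.Perm.eq_of_pairwise (le := fun a b : Int => a ≤ b)
          (fun a b _ _ hab hba => by omega) ?_ hpair
          ((List.mergeSort_perm deg _).trans hperm.symm)
        exact hsorted.imp (by intro a b h; simpa using h)
      rw [heq, hrep]
    · intro hq
      have hperm2 : (List.replicate (n - 1).toNat (1 : Int) ++ [n - 1]).Perm deg := by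
        rw [← hq]
        exact List.mergeSort_perm deg _
      have hvals : ∀ x ∈ deg, x = 1 ∨ x = n - 1 := by
        intro x hx
        have hx' := hperm2.mem_iff.mpr hx
        rcases List.mem_append.mp hx' with h | h
        · exact Or.inl (List.eq_of_mem_replicate h)
        · simp only [List.mem_singleton] at h
          exact Or.inr h
      have hin : (n - 1) ∈ deg := hperm2.subset (by simp)
      obtain ⟨j0, hj0, hdj0⟩ := List.mem_iff_getElem.mp hin
      have hM1 : deg[m.toNat]'hMN = n - 1 := by
        rcases hvals _ (List.getElem_mem hMN) with h | h
        · have hle := hmax' j0 hj0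
          by_cases hn1 : n = 1
          · exfalso
            have hj0m : j0 = m.toNat := by omega
            subst hj0m
            omega
          · rw [h]
            rw [hdj0] at hle
            omega
        · exact h
      refine ⟨hM1, ?_⟩
      intro j hj hjm
      rcases hvals _ (List.getElem_mem hj) with h | h
      · exact h
      · by_cases h11 : n - 1 = 1
        · rw [h, h11]
        · exfalso
          have hc1 : (List.replicate (n - 1).toNat (1 : Int) ++ [n - 1]).count (n - 1) = 1 := by
            rw [List.count_append, List.count_replicate, if_neg (by simp; omega)]
            simp
          have hcd : deg.count (n - 1) = 1 := by rw [← hperm2.count_eq]; exact hc1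
          have h2c := pv_two_le_count hj hMN hjm h hM1
          omega
  by_cases hq : List.mergeSort deg (fun a b => a ≤ b)
      = List.replicate (n - 1).toNat (1 : Int) ++ [n - 1]
  · rw [if_pos (hcond.mpr (hkey.mpr hq)), if_pos (by rwa [beq_iff_eq])]
  · rw [if_neg (fun hp => hq (hkey.mp (hcond.mp hp))),
        if_neg (fun hp => hq (by rwa [beq_iff_eq] at hp))]

-- ===== VERDICT (by name: the statement is the Claim_ definition above) =====
theorem is_star_graph_spec : Claim_equal_is_star_graph := by
  intro n edges _ hpre
  unfold Spec_is_star_graph is_star_graph is_star_graph_alt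
  dsimp only
  rw [pv_snd_foldl]
  exact pv_tail_eq n _ hpre.1 (by rw [pv_size_foldB]; simp)
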